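-- pv_equiv track=rewrite | github.com/yaranasserr/aws | OA leetcodediscuss/serverhealth_2.py | getMaxRequestStrategy
-- ===== SOURCE A (Python) =====
-- import heapq
--
-- def getMaxRequestStrategy(request, health, k):
--
--     n = len(request)
--     total_requests = 0
--     alive = [True] * n
--
--     while any(alive):
--         # Total requests served this second
--         req_this_round = sum(request[i] for i in range(n) if alive[i])
--         total_requests += req_this_round
--
--         # Build max heap based on request[i], then min health as tie-breaker
--         heap = [(-request[i], health[i], i) for i in range(n) if alive[i]]
--         heapq.heapify(heap)
--
--         if heap:
--             _, _, target = heapq.heappop(heap)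
--             health[target] -= k
--             if health[target] <= 0:
--                 alive[target] = False
--
--     total_requests += 1  # Final request after all servers are down
--     return total_requests
-- ===== SOURCE B (Python) =====
-- def getMaxRequestStrategy(request, health, k):
--     # Return-value equivalent to A; does NOT mutate `health` (A does).
--     n = len(request)
--     order = sorted(range(n), key=lambda i: (-request[i], health[i], i))
--     total = 1
--     remaining = sum(request)
--     for i in order:
--         h = health[i]
--         hits = 1 if h <= k else -(-h // k)
--         total += hits * remaining
--         remaining -= request[i]
--     return total
-- ===== Notes on version B (the rewrite author's own statement) =====
-- stated objective: faster
-- what changed: Replaces the round-by-round simulation (one heap rebuild and one sum of all alive requests per second) by a closed form: servers die in the fixed order sorted by (-request, health, index), each taking 1 if health<=k else ceil(health/k) hits, so the answer is 1 + sum of hits_i * suffix-request-sum over that order.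
import Mathlib
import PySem

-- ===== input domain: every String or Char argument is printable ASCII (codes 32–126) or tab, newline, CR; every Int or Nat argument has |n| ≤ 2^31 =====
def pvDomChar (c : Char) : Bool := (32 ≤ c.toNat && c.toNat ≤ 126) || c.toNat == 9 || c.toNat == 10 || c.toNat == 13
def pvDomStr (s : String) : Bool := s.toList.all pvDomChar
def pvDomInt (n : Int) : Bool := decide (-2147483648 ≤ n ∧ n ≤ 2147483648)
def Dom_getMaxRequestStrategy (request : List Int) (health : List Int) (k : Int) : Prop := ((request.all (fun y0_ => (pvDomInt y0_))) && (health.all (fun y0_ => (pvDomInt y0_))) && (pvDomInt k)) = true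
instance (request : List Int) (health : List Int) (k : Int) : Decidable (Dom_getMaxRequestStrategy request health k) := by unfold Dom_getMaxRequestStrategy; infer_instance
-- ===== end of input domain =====

-- B replaces A's per-second simulation by sort + suffix sums + ceiling division (asymptotically
-- faster). Equivalence is about the RETURN value only: A mutates `health` in place, B does not.

-- ===== PORT A =====
-- strict lexicographic < on the heap triples (-request[i], health[i], i)
def pvLexLt (x y : Int × Int × Nat) : Bool :=
  x.1 < y.1 || (x.1 == y.1 && (x.2.1 < y.2.1 || (x.2.1 == y.2.1 && x.2.2 < y.2.2)))

-- heapq.heapify + one heappop on distinct keys = the lexicographically smallest triple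
def pvHeapMin : List (Int × Int × Nat) → Option (Int × Int × Nat)
  | [] => none
  | x :: xs =>
    match pvHeapMin xs with
    | none => some x
    | some y => if pvLexLt y x then some y else some x

-- sum(request[i] for i in range(n) if alive[i])
def pvAliveSum (request : List Int) (alive : List Bool) : Int :=
  (List.range request.length).foldl
    (fun s i => if alive.getD i false then s + request.getD i 0 else s) 0

-- [(-request[i], health[i], i) for i in range(n) if alive[i]]
def pvCands (request health : List Int) (alive : List Bool) : List (Int × Int × Nat) :=
  ((List.range request.length).filter (fun i => alive.getD i false)).map
    (fun i => (-(request.getD i 0), health.getD i 0, i))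

-- the while-loop of A; `fuel` only makes the recursion structural — under Pre_ it is a proven
-- upper bound on the number of rounds, so it never runs out (A diverges outside Pre_)
def pvLoopA (request : List Int) (k : Int) : Nat → List Int → List Bool → Int → Int
  | 0, _, _, total => total
  | fuel+1, health, alive, total =>
    if alive.any id then
      let total1 := total + pvAliveSum request alive
      match pvHeapMin (pvCands request health alive) with
      | some (_, _, t) =>
        let health1 := health.set t (health.getD t 0 - k)
        if health1.getD t 0 ≤ 0 then
          pvLoopA request k fuel health1 (alive.set t false) total1
        else
          pvLoopA request k fuel health1 alive total1
      | none => pvLoopA request k fuel health alive total1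
    else total

def getMaxRequestStrategy (request : List Int) (health : List Int) (k : Int) : Int :=
  let n := request.length
  let fuel := n + (List.range n).foldl (fun s i => s + (health.getD i 0).natAbs) 0
  pvLoopA request k fuel health (List.replicate n true) 0 + 1

-- ===== PORT B =====
-- key(i) = (-request[i], health[i], i)  (Python tuple comparison = lexicographic)
def pvKeyB (request health : List Int) (i : Nat) : Int × Int × Int :=
  (-(request.getD i 0), health.getD i 0, (i : Int))

-- strict lexicographic < on key triples
def pvKeyLt (x y : Int × Int × Int) : Bool :=
  x.1 < y.1 || (x.1 == y.1 && (x.2.1 < y.2.1 || (x.2.1 == y.2.1 && x.2.2 < y.2.2)))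

def getMaxRequestStrategy_alt (request : List Int) (health : List Int) (k : Int) : Int :=
  let n := request.length
  -- sorted(range(n), key=...) ported as the stable stdlib sort List.mergeSort with the key order
  let order := (List.range n).mergeSort
    (fun i j => !(pvKeyLt (pvKeyB request health j) (pvKeyB request health i)))
  (order.foldl
    (fun (acc : Int × Int) i =>
      let h := health.getD i 0
      let hits : Int := if h ≤ k then 1 else -(PySem.Int.floordiv (-h) k)
      (acc.1 + hits * acc.2, acc.2 - request.getD i 0))
    (1, request.sum)).1

-- ===== PRECONDITION & SPEC =====
-- Exactly the inputs on which A returns: health must cover the first len(request) servers (else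
-- IndexError), and either k ≥ 1 or every such server dies in a single hit (else the while loop
-- never terminates — A returns on no other input, so nothing A returns on is excluded).
def Pre_getMaxRequestStrategy (request : List Int) (health : List Int) (k : Int) : Prop :=
  request.length ≤ health.length ∧
  (1 ≤ k ∨ ∀ h ∈ health.take request.length, h ≤ k)

instance (request : List Int) (health : List Int) (k : Int) :
    Decidable (Pre_getMaxRequestStrategy request health k) := by
  unfold Pre_getMaxRequestStrategy; infer_instance

def pvWitness_getMaxRequestStrategy : List Int × List Int × Int := ([3, 1], [5, 4], 2)

def Spec_getMaxRequestStrategy (request : List Int) (health : List Int) (k : Int) (out : Int) : Prop := out = getMaxRequestStrategy_alt request health k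
instance (request : List Int) (health : List Int) (k : Int) (out : Int) : Decidable (Spec_getMaxRequestStrategy request health k out) := by unfold Spec_getMaxRequestStrategy; infer_instance

-- ===== CLAIM (what is proved, stated in full; the proofs are below) =====
def Claim_equal_getMaxRequestStrategy : Prop := ∀ (request : List Int) (health : List Int) (k : Int), Dom_getMaxRequestStrategy request health k → Pre_getMaxRequestStrategy request health k → Spec_getMaxRequestStrategy request health k (getMaxRequestStrategy request health k)

-- ===== LEMMAS AND PROOFS =====

-- strict lexicographic < on Int key triples, Prop level
def pvLtI (x y : Int × Int × Int) : Prop :=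
  x.1 < y.1 ∨ (x.1 = y.1 ∧ (x.2.1 < y.2.1 ∨ (x.2.1 = y.2.1 ∧ x.2.2 < y.2.2)))

-- strict lexicographic < on A's heap triples, Prop level
def pvLtA (x y : Int × Int × Nat) : Prop :=
  x.1 < y.1 ∨ (x.1 = y.1 ∧ (x.2.1 < y.2.1 ∨ (x.2.1 = y.2.1 ∧ x.2.2 < y.2.2)))

-- kill order: strict key order between indices (original health)
def pvKLt (request health : List Int) (t i : Nat) : Prop :=
  pvLtI (pvKeyB request health t) (pvKeyB request health i)

-- number of hits a server with (original) health h takes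
def pvHits (k h : Int) : Nat :=
  if h ≤ k then 1 else (-(PySem.Int.floordiv (-h) k)).toNat

-- B's fold step, named for the proofs
def pvStep (request health : List Int) (k : Int) (acc : Int × Int) (i : Nat) : Int × Int :=
  let h := health.getD i 0
  let hits : Int := if h ≤ k then 1 else -(PySem.Int.floordiv (-h) k)
  (acc.1 + hits * acc.2, acc.2 - request.getD i 0)

theorem pvAlt_def (request health : List Int) (k : Int) :
    getMaxRequestStrategy_alt request health k =
      (((List.range request.length).mergeSort
        (fun i j => !(pvKeyLt (pvKeyB request health j) (pvKeyB request health i)))).foldl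
          (pvStep request health k) (1, request.sum)).1 := rfl

theorem pvKeyLt_iff (x y : Int × Int × Int) : pvKeyLt x y = true ↔ pvLtI x y := by
  simp [pvKeyLt, pvLtI]

theorem pvLexLt_iff (x y : Int × Int × Nat) : pvLexLt x y = true ↔ pvLtA x y := by
  simp [pvLexLt, pvLtA]

theorem pvLtA_irrefl (x : Int × Int × Nat) : ¬ pvLtA x x := by
  rcases x with ⟨a, b, c⟩; simp [pvLtA]; try omega

theorem pvLtA_asymm (x y : Int × Int × Nat) : pvLtA x y → ¬ pvLtA y x := by
  rcases x with ⟨a, b, c⟩; rcases y with ⟨a', b', c'⟩; simp [pvLtA]; try omega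

theorem pvLtI_trans (x y z : Int × Int × Int) : pvLtI x y → pvLtI y z → pvLtI x z := by
  rcases x with ⟨a, b, c⟩; rcases y with ⟨a', b', c'⟩; rcases z with ⟨a'', b'', c''⟩
  simp [pvLtI]; omega

theorem pvLtI_total (x y : Int × Int × Int) : pvLtI x y ∨ x = y ∨ pvLtI y x := by
  rcases x with ⟨a, b, c⟩; rcases y with ⟨a', b', c'⟩
  simp [pvLtI, Prod.ext_iff]; omega

-- heapify + heappop returns the (unique) lexicographic minimum
theorem pvHeapMin_mem : ∀ {l : List (Int × Int × Nat)} {y}, pvHeapMin l = some y → y ∈ l := by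
  intro l
  induction l with
  | nil => intro y h; simp [pvHeapMin] at h
  | cons x xs ih =>
    intro y h
    rw [pvHeapMin] at h
    cases hxs : pvHeapMin xs with
    | none => rw [hxs] at h; simp at h; simp [h]
    | some z =>
      rw [hxs] at h
      by_cases hlt : pvLexLt z x = true
      · simp [hlt] at h; subst h; exact List.mem_cons_of_mem _ (ih hxs)
      · simp [hlt] at h; simp [h]

theorem pvHeapMin_eq : ∀ {l : List (Int × Int × Nat)} {e}, e ∈ l →
    (∀ x ∈ l, x = e ∨ pvLtA e x) → pvHeapMin l = some e := by
  intro l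
  induction l with
  | nil => intro e h; simp at h
  | cons x xs ih =>
    intro e he hmin
    rw [pvHeapMin]
    rcases List.mem_cons.mp he with rfl | hexs
    · cases hxs : pvHeapMin xs with
      | none => rfl
      | some z =>
        have hz : z ∈ xs := pvHeapMin_mem hxs
        rcases hmin z (List.mem_cons_of_mem _ hz) with rfl | hlt
        · have : ¬ pvLexLt z z = true := by
            rw [pvLexLt_iff]; exact pvLtA_irrefl z
          simp [this]
        · have : ¬ pvLexLt z e = true := by
            rw [pvLexLt_iff]; exact pvLtA_asymm _ _ hlt
          simp [this]
    · have hxs : pvHeapMin xs = some e :=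
        ih hexs (fun x hx => hmin x (List.mem_cons_of_mem _ hx))
      rw [hxs]
      rcases hmin x (List.mem_cons_self) with heq | hlt
      · rw [heq]; by_cases h : pvLexLt e e = true <;> simp [h]
      · have : pvLexLt e x = true := (pvLexLt_iff _ _).mpr hlt
        simp [this]

-- a guarded accumulating foldl is a sum over the filtered list
theorem pvFoldl_if_sum (p : Nat → Bool) (g : Nat → Int) :
    ∀ (l : List Nat) (init : Int),
      l.foldl (fun s i => if p i then s + g i else s) init =
        init + ((l.filter p).map g).sum := by
  intro l
  induction l with
  | nil => intro init; simp
  | cons x xs ih =>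
    intro init
    by_cases hx : p x <;> simp [hx, ih, List.filter_cons] <;> ring

theorem pvFoldl_add_nat (g : Nat → Nat) :
    ∀ (l : List Nat) (init : Nat),
      l.foldl (fun s i => s + g i) init = init + (l.map g).sum := by
  intro l
  induction l with
  | nil => intro init; simp
  | cons x xs ih => intro init; simp [ih]; omega

theorem pvMap_getD_range (xs : List Int) :
    (List.range xs.length).map (fun i => xs.getD i 0) = xs := by
  apply List.ext_getElem (by simp)
  intro i h1 h2
  simp [List.getD, List.getElem?_eq_getElem h2]

theorem pvGetD_set_ne {α : Type} (l : List α) (t i : Nat) (a d : α) (h : i ≠ t) :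
    (l.set t a).getD i d = l.getD i d := by
  simp [List.getD, List.getElem?_set_ne (Ne.symm h)]

theorem pvGetD_set_self {α : Type} (l : List α) (t : Nat) (a d : α) (h : t < l.length) :
    (l.set t a).getD t d = a := by
  rw [List.getD_eq_getElem _ _ (by simpa using h), List.getElem_set_self]

-- the per-second request sum is the sum over any list enumerating the alive indices
theorem pvAliveSum_eq (request : List Int) (alive : List Bool) (ord : List Nat)
    (hnd : ord.Nodup) (hlt : ∀ i ∈ ord, i < request.length)
    (hmem : ∀ i, i < request.length → (alive.getD i false = true ↔ i ∈ ord)) :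
    pvAliveSum request alive = (ord.map (fun i => request.getD i 0)).sum := by
  unfold pvAliveSum
  rw [pvFoldl_if_sum, zero_add]
  have hperm : ((List.range request.length).filter (fun i => alive.getD i false)).Perm ord := by
    apply List.perm_of_nodup_nodup_toFinset_eq
      (List.Nodup.filter _ (List.nodup_range)) hnd
    ext i
    simp only [List.mem_toFinset, List.mem_filter, List.mem_range]
    constructor
    · rintro ⟨h1, h2⟩; exact (hmem i h1).mp h2
    · intro h; exact ⟨hlt i h, (hmem i (hlt i h)).mpr h⟩
  exact (hperm.map _).sum_eq

theorem pvAny_true (alive : List Bool) (t : Nat) (ht : t < alive.length)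
    (h : alive.getD t false = true) : alive.any id = true := by
  rw [List.any_eq_true]
  exact ⟨alive[t], List.getElem_mem ht, by rwa [← List.getD_eq_getElem alive false ht]⟩

theorem pvAny_false (alive : List Bool) (h : ∀ i, i < alive.length → alive.getD i false = false) :
    alive.any id = false := by
  rw [Bool.eq_false_iff]
  intro hc
  rw [List.any_eq_true] at hc
  obtain ⟨x, hx, hxt⟩ := hc
  obtain ⟨i, hi, rfl⟩ := List.mem_iff_getElem.mp hx
  rw [← List.getD_eq_getElem alive false hi] at hxt
  rw [h i hi] at hxt
  exact Bool.false_ne_true hxt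

theorem pvKLt_bridge (request health : List Int) (t i : Nat) (c : Int)
    (h : pvKLt request health t i) (hc : c ≤ health.getD t 0) :
    pvLtA (-(request.getD t 0), c, t) (-(request.getD i 0), health.getD i 0, i) := by
  simp only [pvKLt, pvLtI, pvKeyB, pvLtA] at *
  omega

theorem pvLoopA_step (request : List Int) (k : Int) (f : Nat) (hcur : List Int)
    (alive : List Bool) (total : Int) (a b : Int) (t : Nat)
    (hany : alive.any id = true)
    (hheap : pvHeapMin (pvCands request hcur alive) = some (a, b, t)) :
    pvLoopA request k (f + 1) hcur alive total =
      if (hcur.set t (hcur.getD t 0 - k)).getD t 0 ≤ 0 then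
        pvLoopA request k f (hcur.set t (hcur.getD t 0 - k)) (alive.set t false)
          (total + pvAliveSum request alive)
      else
        pvLoopA request k f (hcur.set t (hcur.getD t 0 - k)) alive
          (total + pvAliveSum request alive) := by
  rw [pvLoopA, hany, hheap]
  rfl

-- one phase: the current lexicographic minimum t is hit m times in a row and dies
theorem pvPhase (request health : List Int) (k : Int)
    (hk : 1 ≤ k ∨ ∀ i, i < request.length → health.getD i 0 ≤ k)
    (hn : request.length ≤ health.length) :
    ∀ (μ : Nat) (c : Int) (hc : List Int) (alive : List Bool) (total : Int)
      (fuel : Nat) (t : Nat) (rest : List Nat),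
      t < request.length →
      hc.length = health.length →
      alive.length = request.length →
      (∀ i, i < request.length → (alive.getD i false = true ↔ i = t ∨ i ∈ rest)) →
      t ∉ rest →
      hc.getD t 0 = c →
      (∀ i ∈ rest, hc.getD i 0 = health.getD i 0) →
      c ≤ health.getD t 0 →
      (∀ i ∈ rest, pvKLt request health t i) →
      (c - (μ + 1 : Nat) * k ≤ 0) →
      (∀ j : Nat, 1 ≤ j → j < μ + 1 → 0 < c - j * k) →
      μ + 1 ≤ fuel →
      pvLoopA request k fuel hc alive total =
        pvLoopA request k (fuel - (μ + 1)) (hc.set t (c - (μ + 1 : Nat) * k))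
          (alive.set t false) (total + (μ + 1 : Nat) * pvAliveSum request alive) := by
  intro μ
  induction μ with
  | zero =>
    intro c hc alive total fuel t rest ht hlen halen hmem htr hhc hhr hcle hmin hdie hlive hfuel
    obtain ⟨f, rfl⟩ : ∃ f, fuel = f + 1 := ⟨fuel - 1, by omega⟩
    have htl : t < hc.length := by omega
    have hany : alive.any id = true :=
      pvAny_true alive t (by omega) ((hmem t ht).mpr (Or.inl rfl))
    have hheap : pvHeapMin (pvCands request hc alive) = some (-(request.getD t 0), c, t) := by
      apply pvHeapMin_eq
      · simp only [pvCands, List.mem_map, List.mem_filter, List.mem_range]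
        exact ⟨t, ⟨ht, (hmem t ht).mpr (Or.inl rfl)⟩, by rw [hhc]⟩
      · intro x hx
        simp only [pvCands, List.mem_map, List.mem_filter, List.mem_range] at hx
        obtain ⟨i, ⟨hin, hia⟩, rfl⟩ := hx
        rcases (hmem i hin).mp hia with rfl | hir
        · left; rw [hhc]
        · right
          rw [hhr i hir]
          exact pvKLt_bridge request health t i c (hmin i hir) hcle
    rw [pvLoopA_step request k f hc alive total _ _ t hany hheap]
    rw [hhc, pvGetD_set_self hc t (c - k) 0 htl]
    have hck : c - k ≤ 0 := by
      have := hdie; push_cast at this; linarith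
    rw [if_pos hck]
    have e1 : c - k = c - ((0 + 1 : Nat) : Int) * k := by push_cast; ring
    have e2 : total + pvAliveSum request alive
        = total + ((0 + 1 : Nat) : Int) * pvAliveSum request alive := by push_cast; ring
    rw [e1] at *
    norm_num
  | succ μ ih =>
    intro c hc alive total fuel t rest ht hlen halen hmem htr hhc hhr hcle hmin hdie hlive hfuel
    obtain ⟨f, rfl⟩ : ∃ f, fuel = f + 1 := ⟨fuel - 1, by omega⟩
    have htl : t < hc.length := by omega
    have hany : alive.any id = true :=
      pvAny_true alive t (by omega) ((hmem t ht).mpr (Or.inl rfl))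
    have hheap : pvHeapMin (pvCands request hc alive) = some (-(request.getD t 0), c, t) := by
      apply pvHeapMin_eq
      · simp only [pvCands, List.mem_map, List.mem_filter, List.mem_range]
        exact ⟨t, ⟨ht, (hmem t ht).mpr (Or.inl rfl)⟩, by rw [hhc]⟩
      · intro x hx
        simp only [pvCands, List.mem_map, List.mem_filter, List.mem_range] at hx
        obtain ⟨i, ⟨hin, hia⟩, rfl⟩ := hx
        rcases (hmem i hin).mp hia with rfl | hir
        · left; rw [hhc]
        · right
          rw [hhr i hir]
          exact pvKLt_bridge request health t i c (hmin i hir) hcle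
    rw [pvLoopA_step request k f hc alive total _ _ t hany hheap]
    rw [hhc, pvGetD_set_self hc t (c - k) 0 htl]
    have hck : ¬ (c - k ≤ 0) := by
      have := hlive 1 (le_refl 1) (by omega); push_cast at this; linarith
    rw [if_neg hck]
    have hk1 : 1 ≤ k := by
      rcases hk with h | h
      · exact h
      · exfalso
        have h1 := h t ht
        have h2 := hlive 1 (le_refl 1) (by omega)
        push_cast at h2; linarith
    have hih := ih (c - k) (hc.set t (c - k)) alive (total + pvAliveSum request alive) f t rest
      ht (by rw [List.length_set]; exact hlen) halen hmem htr
      (pvGetD_set_self hc t (c - k) 0 htl)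
      (fun i hi => by
        rw [pvGetD_set_ne hc t i (c - k) 0 (fun hit => htr (hit ▸ hi))]
        exact hhr i hi)
      (by linarith)
      hmin
      (by
        have := hdie; push_cast at this ⊢; linarith)
      (fun j hj1 hj2 => by
        have := hlive (j + 1) (by omega) (by omega)
        push_cast at this ⊢; linarith)
      (by omega)
    rw [hih]
    have e1 : (hc.set t (c - k)).set t (c - k - ((μ + 1 : Nat) : Int) * k)
        = hc.set t (c - ((μ + 1 + 1 : Nat) : Int) * k) := by
      rw [List.set_set]
      congr 1
      push_cast; ring
    have e2 : total + pvAliveSum request alive + ((μ + 1 : Nat) : Int) * pvAliveSum request alive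
        = total + ((μ + 1 + 1 : Nat) : Int) * pvAliveSum request alive := by
      push_cast; ring
    have e3 : f - (μ + 1) = f + 1 - (μ + 1 + 1) := by omega
    rw [e1, e2, e3]

-- the whole run, phase by phase along the kill order
theorem pvRun (request health : List Int) (k : Int)
    (hk : 1 ≤ k ∨ ∀ i, i < request.length → health.getD i 0 ≤ k)
    (hn : request.length ≤ health.length) :
    ∀ (ord : List Nat) (hc : List Int) (alive : List Bool) (total S : Int) (fuel : Nat),
      ord.Nodup → (∀ i ∈ ord, i < request.length) →
      hc.length = health.length → alive.length = request.length →
      (∀ i, i < request.length → (alive.getD i false = true ↔ i ∈ ord)) →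
      (∀ i ∈ ord, hc.getD i 0 = health.getD i 0) →
      ord.Pairwise (pvKLt request health) →
      S = pvAliveSum request alive →
      (ord.map (fun i => pvHits k (health.getD i 0))).sum ≤ fuel →
      pvLoopA request k fuel hc alive total =
        (ord.foldl (pvStep request health k) (total, S)).1 := by
  intro ord
  induction ord with
  | nil =>
    intro hc alive total S fuel hnd hlt hlen halen hmem hhr hpw hS hfuel
    have hany : alive.any id = false := by
      apply pvAny_false
      intro i hi
      have h := hmem i (by omega)
      simp only [List.not_mem_nil, iff_false] at h
      exact Bool.not_eq_true _ |>.mp h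
    cases fuel with
    | zero => rw [pvLoopA]; rfl
    | succ f => rw [pvLoopA, hany]; rfl
  | cons t rest ih =>
    intro hc alive total S fuel hnd hlt hlen halen hmem hhr hpw hS hfuel
    have ht : t < request.length := hlt t List.mem_cons_self
    have hhct : hc.getD t 0 = health.getD t 0 := hhr t List.mem_cons_self
    have htr : t ∉ rest := (List.nodup_cons.mp hnd).1
    have hndr : rest.Nodup := (List.nodup_cons.mp hnd).2
    have hminr : ∀ i ∈ rest, pvKLt request health t i := (List.pairwise_cons.mp hpw).1
    have hpwr : rest.Pairwise (pvKLt request health) := (List.pairwise_cons.mp hpw).2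
    -- hit count facts for t
    have hfacts : ((if health.getD t 0 ≤ k then (1 : Int)
          else -(PySem.Int.floordiv (-(health.getD t 0)) k))
            = ((pvHits k (health.getD t 0) : Nat) : Int))
        ∧ 1 ≤ pvHits k (health.getD t 0)
        ∧ health.getD t 0 - (pvHits k (health.getD t 0) : Int) * k ≤ 0
        ∧ (∀ j : Nat, 1 ≤ j → j < pvHits k (health.getD t 0) →
            0 < health.getD t 0 - (j : Int) * k) := by
      by_cases hle : health.getD t 0 ≤ k
      · have hp : pvHits k (health.getD t 0) = 1 := by
          simp only [pvHits]; rw [if_pos hle]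
        refine ⟨?_, ?_, ?_, ?_⟩
        · rw [if_pos hle, hp]; norm_num
        · omega
        · rw [hp]; push_cast; linarith
        · intro j hj1 hj2; rw [hp] at hj2; omega
      · have hk1 : 1 ≤ k := by
          rcases hk with h | h
          · exact h
          · exact absurd (h t ht) hle
        have hbr := (PySem.Int.neg_floordiv_neg_eq_iff_of_pos (by linarith :
          (0 : Int) < k)).mp (rfl : -(PySem.Int.floordiv (-(health.getD t 0)) k)
            = -(PySem.Int.floordiv (-(health.getD t 0)) k))
        have hq1 : 1 ≤ -(PySem.Int.floordiv (-(health.getD t 0)) k) := by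
          nlinarith [hbr.1, hbr.2]
        have hcast : ((pvHits k (health.getD t 0) : Nat) : Int)
            = -(PySem.Int.floordiv (-(health.getD t 0)) k) := by
          simp only [pvHits, if_neg hle]
          exact Int.toNat_of_nonneg (by linarith)
        refine ⟨by rw [if_neg hle, hcast], ?_, ?_, ?_⟩
        · simp only [pvHits, if_neg hle]; omega
        · rw [hcast]; linarith [hbr.2]
        · intro j hj1 hj2
          have hjq : (j : Int) ≤ -(PySem.Int.floordiv (-(health.getD t 0)) k) - 1 := by
            simp only [pvHits, if_neg hle] at hj2; omega
          have : (j : Int) * k ≤ (-(PySem.Int.floordiv (-(health.getD t 0)) k) - 1) * k :=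
            mul_le_mul_of_nonneg_right hjq (by linarith)
          linarith [hbr.1]
    obtain ⟨hmInt, hm1, hdie, hlive⟩ := hfacts
    obtain ⟨μ, hμ⟩ : ∃ μ, pvHits k (health.getD t 0) = μ + 1 :=
      ⟨pvHits k (health.getD t 0) - 1, by omega⟩
    have hfuelr : (rest.map (fun i => pvHits k (health.getD i 0))).sum ≤ fuel - (μ + 1) := by
      simp only [List.map_cons, List.sum_cons, hμ] at hfuel ⊢; omega
    have hphase := pvPhase request health k hk hn μ (health.getD t 0) hc alive total fuel t rest
      ht hlen halen
      (fun i hi => by rw [hmem i hi, List.mem_cons])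
      htr hhct (fun i hi => hhr i (List.mem_cons_of_mem _ hi)) (le_refl _) hminr
      (by rw [← hμ]; push_cast at hdie ⊢; linarith)
      (fun j hj1 hj2 => hlive j hj1 (by omega))
      (by simp only [List.map_cons, List.sum_cons, hμ] at hfuel; omega)
    rw [hphase]
    have hS1 : S = ((t :: rest).map (fun i => request.getD i 0)).sum := by
      rw [hS]; exact pvAliveSum_eq request alive (t :: rest) hnd hlt hmem
    have hS2 : pvAliveSum request (alive.set t false)
        = (rest.map (fun i => request.getD i 0)).sum := by
      apply pvAliveSum_eq request (alive.set t false) rest hndr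
        (fun i hi => hlt i (List.mem_cons_of_mem _ hi))
      intro i hi
      by_cases hit : i = t
      · subst hit
        rw [pvGetD_set_self alive i false false (by omega)]
        simp [htr]
      · rw [pvGetD_set_ne alive t i false false hit, hmem i hi, List.mem_cons]
        constructor
        · rintro (rfl | h); exact absurd rfl hit; exact h
        · intro h; exact Or.inr h
    have hrun := ih (hc.set t (health.getD t 0 - ((μ + 1 : Nat) : Int) * k))
      (alive.set t false)
      (total + ((μ + 1 : Nat) : Int) * pvAliveSum request alive)
      (S - request.getD t 0) (fuel - (μ + 1))
      hndr (fun i hi => hlt i (List.mem_cons_of_mem _ hi))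
      (by rw [List.length_set]; exact hlen)
      (by rw [List.length_set]; exact halen)
      (fun i hi => by
        by_cases hit : i = t
        · subst hit
          rw [pvGetD_set_self alive i false false (by omega)]
          simp [htr]
        · rw [pvGetD_set_ne alive t i false false hit, hmem i hi, List.mem_cons]
          constructor
          · rintro (rfl | h); exact absurd rfl hit; exact h
          · intro h; exact Or.inr h)
      (fun i hi => by
        rw [pvGetD_set_ne hc t i _ 0 (fun hit => htr (hit ▸ hi))]
        exact hhr i (List.mem_cons_of_mem _ hi))
      hpwr
      (by
        rw [hS2, hS1]
        simp only [List.map_cons, List.sum_cons]; ring)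
      (by rw [← hμ] at hfuelr ⊢; exact hfuelr)
    rw [hrun]
    -- now reduce the RHS fold one step
    show _ = (rest.foldl (pvStep request health k) (pvStep request health k (total, S) t)).1
    have hstep : pvStep request health k (total, S) t
        = (total + ((μ + 1 : Nat) : Int) * pvAliveSum request alive, S - request.getD t 0) := by
      rw [pvStep]
      have hSA : pvAliveSum request alive = S := hS.symm
      simp only []
      rw [hmInt, hμ, hSA]
    rw [hstep]

theorem pvFoldl_affine (request health : List Int) (k : Int) :
    ∀ (l : List Nat) (a b S : Int),
      (l.foldl (pvStep request health k) (a + b, S)).1 =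
        a + (l.foldl (pvStep request health k) (b, S)).1 := by
  intro l
  induction l with
  | nil => intro a b S; rfl
  | cons x xs ih =>
    intro a b S
    show (xs.foldl _ (pvStep request health k (a + b, S) x)).1 = _
    rw [pvStep]
    have : a + b + (if health.getD x 0 ≤ k then (1:Int)
        else -(PySem.Int.floordiv (-(health.getD x 0)) k)) * S
        = a + (b + (if health.getD x 0 ≤ k then (1:Int)
        else -(PySem.Int.floordiv (-(health.getD x 0)) k)) * S) := by ring
    rw [this, ih]
    rfl

theorem pvLtI_asymm (x y : Int × Int × Int) : pvLtI x y → ¬ pvLtI y x := by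
  rcases x with ⟨a, b, c⟩; rcases y with ⟨a', b', c'⟩; simp [pvLtI]; try omega

theorem pvKeyB_inj (request health : List Int) (i j : Nat)
    (h : pvKeyB request health i = pvKeyB request health j) : i = j := by
  simp only [pvKeyB, Prod.ext_iff] at h
  omega

theorem pvSum_hits_le (f g : Nat → Nat) :
    ∀ l : List Nat, (∀ i ∈ l, f i ≤ 1 + g i) →
      (l.map f).sum ≤ l.length + (l.map g).sum := by
  intro l
  induction l with
  | nil => intro _; simp
  | cons x xs ih =>
    intro h
    have h1 := h x List.mem_cons_self
    have h2 := ih (fun i hi => h i (List.mem_cons_of_mem _ hi))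
    simp only [List.map_cons, List.sum_cons, List.length_cons]
    omega

-- ===== VERDICT (by name: the statement is the Claim_ definition above) =====
theorem getMaxRequestStrategy_spec : Claim_equal_getMaxRequestStrategy := by
  intro request health k hdom hpre
  obtain ⟨hn, hkpre⟩ := hpre
  have hk : 1 ≤ k ∨ ∀ i, i < request.length → health.getD i 0 ≤ k := by
    rcases hkpre with h | h
    · exact Or.inl h
    · right
      intro i hi
      rw [List.getD_eq_getElem health 0 (lt_of_lt_of_le hi hn)]
      apply h
      have hlt : i < (health.take request.length).length := by
        rw [List.length_take]; omega
      have hgt : (health.take request.length)[i] = health[i]'(lt_of_lt_of_le hi hn) :=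
        List.getElem_take (h := hlt)
      rw [← hgt]
      exact List.getElem_mem hlt
  show pvLoopA request k
      (request.length + (List.range request.length).foldl
        (fun s i => s + (health.getD i 0).natAbs) 0)
      health (List.replicate request.length true) 0 + 1
    = getMaxRequestStrategy_alt request health k
  rw [pvAlt_def]
  have hperm : ((List.range request.length).mergeSort
      (fun i j => !(pvKeyLt (pvKeyB request health j) (pvKeyB request health i)))).Perm
        (List.range request.length) := List.mergeSort_perm _ _
  have hnd : ((List.range request.length).mergeSort
      (fun i j => !(pvKeyLt (pvKeyB request health j) (pvKeyB request health i)))).Nodup :=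
    hperm.nodup_iff.mpr (List.nodup_range)
  have hmemord : ∀ i, i ∈ (List.range request.length).mergeSort
      (fun i j => !(pvKeyLt (pvKeyB request health j) (pvKeyB request health i)))
        ↔ i < request.length := fun i => by rw [hperm.mem_iff, List.mem_range]
  have hcmp : ∀ i j : Nat,
      ((!(pvKeyLt (pvKeyB request health j) (pvKeyB request health i))) = true)
        ↔ ¬ pvLtI (pvKeyB request health j) (pvKeyB request health i) := by
    intro i j
    rw [Bool.not_eq_true', ← Bool.not_eq_true, pvKeyLt_iff]
  have htrans : ∀ a b c : Nat,
      (!(pvKeyLt (pvKeyB request health b) (pvKeyB request health a))) = true →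
      (!(pvKeyLt (pvKeyB request health c) (pvKeyB request health b))) = true →
      (!(pvKeyLt (pvKeyB request health c) (pvKeyB request health a))) = true := by
    intro a b c h1 h2
    rw [hcmp] at h1 h2 ⊢
    intro hca
    rcases pvLtI_total (pvKeyB request health c) (pvKeyB request health b) with h | h | h
    · exact h2 h
    · exact h1 (h ▸ hca)
    · exact h1 (pvLtI_trans _ _ _ h hca)
  have htotal : ∀ a b : Nat,
      ((!(pvKeyLt (pvKeyB request health b) (pvKeyB request health a))) ||
        (!(pvKeyLt (pvKeyB request health a) (pvKeyB request health b)))) = true := by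
    intro a b
    rw [Bool.or_eq_true, hcmp, hcmp]
    by_cases h : pvLtI (pvKeyB request health b) (pvKeyB request health a)
    · exact Or.inr (pvLtI_asymm _ _ h)
    · exact Or.inl h
  have hpw : ((List.range request.length).mergeSort
      (fun i j => !(pvKeyLt (pvKeyB request health j) (pvKeyB request health i)))).Pairwise
        (pvKLt request health) := by
    have h1 := List.pairwise_mergeSort htrans htotal (List.range request.length)
    have h2 : ((List.range request.length).mergeSort
        (fun i j => !(pvKeyLt (pvKeyB request health j) (pvKeyB request health i)))).Pairwise
          (fun a b => a ≠ b) := hnd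
    refine (h1.and h2).imp ?_
    rintro a b ⟨hab, hne⟩
    rw [hcmp] at hab
    rcases pvLtI_total (pvKeyB request health a) (pvKeyB request health b) with h | h | h
    · exact h
    · exact absurd (pvKeyB_inj request health a b h) hne
    · exact absurd h hab
  have hpoint : ∀ i ∈ (List.range request.length).mergeSort
      (fun i j => !(pvKeyLt (pvKeyB request health j) (pvKeyB request health i))),
      pvHits k (health.getD i 0) ≤ 1 + (health.getD i 0).natAbs := by
    intro i hi
    have hin : i < request.length := (hmemord i).mp hi
    by_cases hle : health.getD i 0 ≤ k
    · simp only [pvHits, if_pos hle]; omega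
    · have hk1 : 1 ≤ k := by
        rcases hk with h | h
        · exact h
        · exact absurd (h i hin) hle
      have hbr := (PySem.Int.neg_floordiv_neg_eq_iff_of_pos (by linarith :
        (0 : Int) < k)).mp (rfl : -(PySem.Int.floordiv (-(health.getD i 0)) k)
          = -(PySem.Int.floordiv (-(health.getD i 0)) k))
      have hq1 : 1 ≤ -(PySem.Int.floordiv (-(health.getD i 0)) k) := by
        nlinarith [hbr.1, hbr.2]
      have hqh : -(PySem.Int.floordiv (-(health.getD i 0)) k) ≤ health.getD i 0 := by
        have hmul : (-(PySem.Int.floordiv (-(health.getD i 0)) k) - 1) * 1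
            ≤ (-(PySem.Int.floordiv (-(health.getD i 0)) k) - 1) * k :=
          mul_le_mul_of_nonneg_left hk1 (by linarith)
        linarith [hbr.1]
      simp only [pvHits, if_neg hle]
      omega
  have hfuelle : (((List.range request.length).mergeSort
      (fun i j => !(pvKeyLt (pvKeyB request health j) (pvKeyB request health i)))).map
        (fun i => pvHits k (health.getD i 0))).sum
      ≤ request.length + (List.range request.length).foldl
          (fun s i => s + (health.getD i 0).natAbs) 0 := by
    rw [pvFoldl_add_nat, Nat.zero_add]
    have h1 := pvSum_hits_le (fun i => pvHits k (health.getD i 0))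
      (fun i => (health.getD i 0).natAbs) _ hpoint
    have h2 : ((List.range request.length).mergeSort
        (fun i j => !(pvKeyLt (pvKeyB request health j) (pvKeyB request health i)))).length
          = request.length := by rw [hperm.length_eq, List.length_range]
    have h3 : (((List.range request.length).mergeSort
        (fun i j => !(pvKeyLt (pvKeyB request health j) (pvKeyB request health i)))).map
          (fun i => (health.getD i 0).natAbs)).sum
        = ((List.range request.length).map (fun i => (health.getD i 0).natAbs)).sum :=
      (hperm.map _).sum_eq
    omega
  have hmem0 : ∀ i, i < request.length →
      (((List.replicate request.length true).getD i false = true) ↔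
        i ∈ (List.range request.length).mergeSort
          (fun i j => !(pvKeyLt (pvKeyB request health j) (pvKeyB request health i)))) := by
    intro i hi
    rw [List.getD_eq_getElem _ false (by simpa using hi), List.getElem_replicate, hmemord]
    simp [hi]
  have hrun := pvRun request health k hk hn
    ((List.range request.length).mergeSort
      (fun i j => !(pvKeyLt (pvKeyB request health j) (pvKeyB request health i))))
    health (List.replicate request.length true) 0
    (pvAliveSum request (List.replicate request.length true))
    (request.length + (List.range request.length).foldl
      (fun s i => s + (health.getD i 0).natAbs) 0)
    hnd (fun i hi => (hmemord i).mp hi) rfl (List.length_replicate) hmem0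
    (fun i _ => rfl) hpw rfl hfuelle
  have hS0 : pvAliveSum request (List.replicate request.length true) = request.sum := by
    rw [pvAliveSum_eq request _ _ hnd (fun i hi => (hmemord i).mp hi) hmem0,
      (hperm.map _).sum_eq, pvMap_getD_range]
  rw [hS0] at hrun
  rw [hrun]
  have haff := pvFoldl_affine request health k
    ((List.range request.length).mergeSort
      (fun i j => !(pvKeyLt (pvKeyB request health j) (pvKeyB request health i))))
    1 0 request.sum
  norm_num at haff
  rw [haff]
  ring
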